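-- pv_equiv track=rewrite | github.com/GfKbYu/hORAM | GKW18/gutils.py | findSharedLevel
-- ===== SOURCE A (Python) =====
-- def findSharedLevel(loc0,loc1,depth):
--     tmpL = loc0
--     tmpR = loc1
--     shiftTimes = 0
--     while tmpL!=tmpR:
--         tmpL>>=1
--         tmpR>>=1
--         shiftTimes+=1
--     return depth-shiftTimes
-- ===== SOURCE B (Python) =====
-- def findSharedLevel(loc0, loc1, depth):
--     # Closed form: the number of shifts A performs equals the bit length of
--     # the XOR of the two locations (highest differing bit position).
--     return depth - (loc0 ^ loc1).bit_length()
-- ===== Notes on version B (the rewrite author's own statement) =====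
-- stated objective: idiomatic
-- what changed: Replaced the shift-and-count while loop with the closed form depth - (loc0 ^ loc1).bit_length(): the highest differing bit position equals the number of shifts the loop performs.
-- outside the precondition, e.g. on findSharedLevel(-1, 0, 5): A does not finish within the time limit, B returns 4
import Mathlib
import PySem

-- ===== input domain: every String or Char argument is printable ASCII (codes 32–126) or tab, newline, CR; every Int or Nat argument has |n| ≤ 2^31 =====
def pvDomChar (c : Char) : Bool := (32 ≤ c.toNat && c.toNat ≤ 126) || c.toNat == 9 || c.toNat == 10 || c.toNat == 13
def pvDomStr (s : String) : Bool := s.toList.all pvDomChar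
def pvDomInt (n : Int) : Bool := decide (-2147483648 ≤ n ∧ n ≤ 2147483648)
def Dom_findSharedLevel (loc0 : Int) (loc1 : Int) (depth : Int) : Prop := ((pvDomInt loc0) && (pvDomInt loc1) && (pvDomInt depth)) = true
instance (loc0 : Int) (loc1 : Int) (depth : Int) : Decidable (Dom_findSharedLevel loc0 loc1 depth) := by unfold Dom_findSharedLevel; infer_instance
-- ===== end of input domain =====

-- B replaces A's shift-and-count loop by the closed form depth - bit_length(loc0 XOR loc1) (idiomatic; same value wherever A terminates).


-- ===== PORT A =====
-- The while loop, with fuel to make it total (64 suffices on Dom ∩ Pre_; the fuel is a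
-- totality guard only, the loop itself is A's: halve both values, count the shifts).
def fslLoop (tmpL : Int) (tmpR : Int) (shiftTimes : Int) (fuel : Nat) : Int :=
  match fuel with
  | 0 => shiftTimes
  | Nat.succ f =>
      if tmpL = tmpR then shiftTimes
      else fslLoop (PySem.Int.floordiv tmpL 2) (PySem.Int.floordiv tmpR 2) (shiftTimes + 1) f

def findSharedLevel (loc0 : Int) (loc1 : Int) (depth : Int) : Int :=
  depth - fslLoop loc0 loc1 0 64

-- ===== PORT B =====
def findSharedLevel_alt (loc0 : Int) (loc1 : Int) (depth : Int) : Int :=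
  depth - (PySem.Int.bitLength (PySem.Int.bxor loc0 loc1) : Int)

-- ===== PRECONDITION & SPEC =====
-- Pre_ excludes inputs of mixed sign (one location negative, the other non-negative), on
-- which A's while loop never terminates (the shifted values converge to -1 and 0).
def Pre_findSharedLevel (loc0 : Int) (loc1 : Int) (depth : Int) : Prop :=
  (0 ≤ loc0 ↔ 0 ≤ loc1)
instance (loc0 : Int) (loc1 : Int) (depth : Int) : Decidable (Pre_findSharedLevel loc0 loc1 depth) := by unfold Pre_findSharedLevel; infer_instance
def pvWitness_findSharedLevel : Int × Int × Int := (5, 12, 4)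

def Spec_findSharedLevel (loc0 : Int) (loc1 : Int) (depth : Int) (out : Int) : Prop := out = findSharedLevel_alt loc0 loc1 depth
instance (loc0 : Int) (loc1 : Int) (depth : Int) (out : Int) : Decidable (Spec_findSharedLevel loc0 loc1 depth out) := by unfold Spec_findSharedLevel; infer_instance

-- ===== CLAIM (what is proved, stated in full; the proofs are below) =====
def Claim_equal_findSharedLevel : Prop := ∀ (loc0 : Int) (loc1 : Int) (depth : Int), Dom_findSharedLevel loc0 loc1 depth → Pre_findSharedLevel loc0 loc1 depth → Spec_findSharedLevel loc0 loc1 depth (findSharedLevel loc0 loc1 depth)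

-- ===== LEMMAS AND PROOFS =====

-- Python floor division of -(m+1) by 2 is -(m/2 + 1).
lemma floordiv_negSucc_two (m : Nat) :
    PySem.Int.floordiv (-(m : Int) - 1) 2 = -((m / 2 : Nat) : Int) - 1 := by
  rw [PySem.Int.floordiv_eq_iff_of_pos (by norm_num)]
  constructor <;> push_cast <;> omega

-- Loop characterisation, both arguments non-negative.
lemma fslLoop_nonneg : ∀ (fuel : Nat) (m k : Nat) (s : Int), m ^^^ k < 2 ^ fuel →
    fslLoop (m : Int) (k : Int) s fuel = s + (PySem.Int.bitLength ((m ^^^ k : Nat) : Int) : Int) := by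
  intro fuel
  induction fuel with
  | zero =>
      intro m k s h
      have hmk : m = k := by
        have : m ^^^ k = 0 := by omega
        exact Nat.xor_eq_zero_iff.mp this
      subst hmk
      simp [fslLoop]
  | succ f ih =>
      intro m k s h
      by_cases hmk : m = k
      · subst hmk; simp [fslLoop]
      · have hx : m ^^^ k ≠ 0 := fun h0 => hmk (Nat.xor_eq_zero_iff.mp h0)
        have hne : (m : Int) ≠ (k : Int) := by exact_mod_cast hmk
        have hfm : PySem.Int.floordiv (m : Int) 2 = ((m / 2 : Nat) : Int) := by
          exact_mod_cast PySem.Int.floordiv_natCast m 2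
        have hfk : PySem.Int.floordiv (k : Int) 2 = ((k / 2 : Nat) : Int) := by
          exact_mod_cast PySem.Int.floordiv_natCast k 2
        rw [fslLoop, if_neg hne, hfm, hfk,
          ih (m / 2) (k / 2) (s + 1) (by rw [← Nat.xor_div_two]; omega)]
        rw [← Nat.xor_div_two, PySem.Int.bitLength_natCast (Nat.pos_of_ne_zero hx)]
        push_cast; ring

-- Loop characterisation, both arguments negative (written as -(m+1), -(k+1)).
lemma fslLoop_neg : ∀ (fuel : Nat) (m k : Nat) (s : Int), m ^^^ k < 2 ^ fuel →
    fslLoop (-(m : Int) - 1) (-(k : Int) - 1) s fuel = s + (PySem.Int.bitLength ((m ^^^ k : Nat) : Int) : Int) := by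
  intro fuel
  induction fuel with
  | zero =>
      intro m k s h
      have hmk : m = k := by
        have : m ^^^ k = 0 := by omega
        exact Nat.xor_eq_zero_iff.mp this
      subst hmk
      simp [fslLoop]
  | succ f ih =>
      intro m k s h
      by_cases hmk : m = k
      · subst hmk; simp [fslLoop]
      · have hx : m ^^^ k ≠ 0 := fun h0 => hmk (Nat.xor_eq_zero_iff.mp h0)
        have hne : (-(m : Int) - 1) ≠ (-(k : Int) - 1) := by
          intro he; apply hmk; omega
        rw [fslLoop, if_neg hne, floordiv_negSucc_two m, floordiv_negSucc_two k,
          ih (m / 2) (k / 2) (s + 1) (by rw [← Nat.xor_div_two]; omega)]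
        rw [← Nat.xor_div_two, PySem.Int.bitLength_natCast (Nat.pos_of_ne_zero hx)]
        push_cast; ring

-- ===== VERDICT (by name: the statement is the Claim_ definition above) =====
theorem findSharedLevel_spec : Claim_equal_findSharedLevel := by
  intro loc0 loc1 depth hdom hpre
  unfold Spec_findSharedLevel findSharedLevel findSharedLevel_alt
  have hd : -2147483648 ≤ loc0 ∧ loc0 ≤ 2147483648 ∧ -2147483648 ≤ loc1 ∧ loc1 ≤ 2147483648 := by
    unfold Dom_findSharedLevel pvDomInt at hdom
    simp only [Bool.and_eq_true, decide_eq_true_eq] at hdom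
    exact ⟨hdom.1.1.1, hdom.1.1.2, hdom.1.2.1, hdom.1.2.2⟩
  by_cases h0 : 0 ≤ loc0
  · -- both non-negative
    have h1 : 0 ≤ loc1 := hpre.mp h0
    obtain ⟨m, rfl⟩ : ∃ m : Nat, loc0 = (m : Int) := ⟨loc0.toNat, by omega⟩
    obtain ⟨k, rfl⟩ : ∃ k : Nat, loc1 = (k : Int) := ⟨loc1.toNat, by omega⟩
    have hm : m < 2 ^ 64 := by
      have : (m : Int) ≤ 2147483648 := hd.2.1
      have : m ≤ 2147483648 := by exact_mod_cast this
      calc m ≤ 2147483648 := this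
        _ < 2 ^ 64 := by norm_num
    have hk : k < 2 ^ 64 := by
      have : (k : Int) ≤ 2147483648 := hd.2.2.2
      have : k ≤ 2147483648 := by exact_mod_cast this
      calc k ≤ 2147483648 := this
        _ < 2 ^ 64 := by norm_num
    rw [fslLoop_nonneg 64 m k 0 (Nat.xor_lt_two_pow hm hk), PySem.Int.bxor_natCast]
    ring
  · -- both negative
    have h1 : ¬ 0 ≤ loc1 := fun h => h0 (hpre.mpr h)
    obtain ⟨m, rfl⟩ : ∃ m : Nat, loc0 = -(m : Int) - 1 := ⟨(-loc0 - 1).toNat, by omega⟩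
    obtain ⟨k, rfl⟩ : ∃ k : Nat, loc1 = -(k : Int) - 1 := ⟨(-loc1 - 1).toNat, by omega⟩
    have hm : m < 2 ^ 64 := by
      have : -2147483648 ≤ -(m : Int) - 1 := hd.1
      have : m ≤ 2147483647 := by omega
      calc m ≤ 2147483647 := this
        _ < 2 ^ 64 := by norm_num
    have hk : k < 2 ^ 64 := by
      have : -2147483648 ≤ -(k : Int) - 1 := hd.2.2.1
      have : k ≤ 2147483647 := by omega
      calc k ≤ 2147483647 := this
        _ < 2 ^ 64 := by norm_num
    have hbx : PySem.Int.bxor (-(m : Int) - 1) (-(k : Int) - 1) = ((m ^^^ k : Nat) : Int) := by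
      unfold PySem.Int.bxor
      rw [if_neg (by omega), if_neg (by omega)]
      norm_num
    rw [fslLoop_neg 64 m k 0 (Nat.xor_lt_two_pow hm hk), hbx]
    ring
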